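-- pv_equiv track=rewrite | github.com/6200279/autoDMCA | backend/app/benchmarks/locustfile.py | custom_shape
-- ===== SOURCE A (Python) =====
-- def custom_shape(settings):
--     """
--     Custom load shape for realistic testing
--     Gradually ramps up to peak load, sustains, then ramps down
--     """
--     stages = [
--         {"duration": 60, "users": 10, "spawn_rate": 1},      # Warm-up
--         {"duration": 300, "users": 100, "spawn_rate": 2},    # Ramp-up
--         {"duration": 600, "users": 500, "spawn_rate": 5},    # Increase
--         {"duration": 1200, "users": 1000, "spawn_rate": 10}, # Peak load
--         {"duration": 600, "users": 1000, "spawn_rate": 0},   # Sustain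
--         {"duration": 300, "users": 100, "spawn_rate": -5},   # Ramp-down
--         {"duration": 60, "users": 0, "spawn_rate": -2},      # Cool-down
--     ]
--
--     run_time = 0
--     for stage in stages:
--         run_time += stage["duration"]
--         if settings["run_time"] < run_time:
--             return stage["users"], stage["spawn_rate"]
--
--     return None
-- ===== SOURCE B (Python) =====
-- import bisect
--
-- # cumulative stage-end times and the (users, spawn_rate) of each stage
-- _BOUNDARIES = [60, 360, 960, 2160, 2760, 3060, 3120]
-- _STAGE_VALUES = [(10, 1), (100, 2), (500, 5), (1000, 10), (1000, 0), (100, -5), (0, -2)]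
--
--
-- def custom_shape(settings):
--     """
--     Custom load shape for realistic testing
--     Gradually ramps up to peak load, sustains, then ramps down
--     """
--     i = bisect.bisect_right(_BOUNDARIES, settings["run_time"])
--     if i == len(_STAGE_VALUES):
--         return None
--     return _STAGE_VALUES[i]
-- ===== Notes on version B (the rewrite author's own statement) =====
-- stated objective: alternative
-- what changed: Replaces the linear accumulating scan over the stage dicts with precomputed cumulative boundaries and a single bisect_right lookup into a parallel value table.
import Mathlib
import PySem

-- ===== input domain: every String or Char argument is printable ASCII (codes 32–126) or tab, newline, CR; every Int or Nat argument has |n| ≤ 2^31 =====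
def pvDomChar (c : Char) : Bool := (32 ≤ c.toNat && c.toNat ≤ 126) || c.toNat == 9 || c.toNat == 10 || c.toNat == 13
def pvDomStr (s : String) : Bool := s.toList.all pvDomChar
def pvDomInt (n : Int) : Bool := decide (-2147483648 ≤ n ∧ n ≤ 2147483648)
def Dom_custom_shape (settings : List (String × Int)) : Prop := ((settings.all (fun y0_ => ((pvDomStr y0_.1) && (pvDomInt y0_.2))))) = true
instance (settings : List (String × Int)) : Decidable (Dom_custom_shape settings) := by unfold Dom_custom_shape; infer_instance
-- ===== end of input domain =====

-- B replaces A's linear accumulating scan over the stage dicts with precomputed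
-- cumulative boundaries and a single bisect_right lookup into a value table (alternative).

-- ===== PORT A =====
-- the for-loop of A: run_time accumulator, stages as (duration, users, spawn_rate)
def customShapeLoopA (rt : Int) (stages : List (Int × Int × Int)) (runTime : Int) : Option (Int × Int) :=
  match stages with
  | [] => none
  | (d, u, s) :: rest =>
    let runTime' := runTime + d
    if rt < runTime' then some (u, s) else customShapeLoopA rt rest runTime'

def custom_shape (settings : List (String × Int)) : Option (Int × Int) :=
  match (PySem.Dict.mk settings).get? "run_time" with
  | none => none  -- Python raises KeyError here; excluded by Pre_custom_shape
  | some rt =>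
    customShapeLoopA rt
      [(60, 10, 1), (300, 100, 2), (600, 500, 5), (1200, 1000, 10),
       (600, 1000, 0), (300, 100, -5), (60, 0, -2)] 0

-- ===== PORT B =====
-- bisect.bisect_right on a sorted list = number of elements ≤ x (exact for sorted input)
def bisectRight (l : List Int) (x : Int) : Nat :=
  (l.takeWhile (fun b => decide (b ≤ x))).length

def custom_shape_alt (settings : List (String × Int)) : Option (Int × Int) :=
  match (PySem.Dict.mk settings).get? "run_time" with
  | none => none  -- Python raises KeyError here; excluded by Pre_custom_shape
  | some rt =>
    let vals : List (Int × Int) := [(10, 1), (100, 2), (500, 5), (1000, 10), (1000, 0), (100, -5), (0, -2)]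
    let i := bisectRight [60, 360, 960, 2160, 2760, 3060, 3120] rt
    if i = vals.length then none else vals[i]?

-- ===== PRECONDITION & SPEC =====
-- Pre_ excludes settings without a "run_time" key, on which Python A raises KeyError.
def Pre_custom_shape (settings : List (String × Int)) : Prop :=
  "run_time" ∈ settings.map Prod.fst
instance (settings : List (String × Int)) : Decidable (Pre_custom_shape settings) := by
  unfold Pre_custom_shape; infer_instance

def pvWitness_custom_shape : (List (String × Int)) := [("run_time", 100)]

def Spec_custom_shape (settings : List (String × Int)) (out : Option (Int × Int)) : Prop := out = custom_shape_alt settings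
instance (settings : List (String × Int)) (out : Option (Int × Int)) : Decidable (Spec_custom_shape settings out) := by unfold Spec_custom_shape; infer_instance

-- ===== CLAIM (what is proved, stated in full; the proofs are below) =====
def Claim_equal_custom_shape : Prop := ∀ (settings : List (String × Int)), Dom_custom_shape settings → Pre_custom_shape settings → Spec_custom_shape settings (custom_shape settings)

-- ===== LEMMAS AND PROOFS =====
lemma custom_shape_pointwise (rt : Int) :
    customShapeLoopA rt
      [(60, 10, 1), (300, 100, 2), (600, 500, 5), (1200, 1000, 10),
       (600, 1000, 0), (300, 100, -5), (60, 0, -2)] 0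
    = (let vals : List (Int × Int) := [(10, 1), (100, 2), (500, 5), (1000, 10), (1000, 0), (100, -5), (0, -2)]
       let i := bisectRight [60, 360, 960, 2160, 2760, 3060, 3120] rt
       if i = vals.length then none else vals[i]?) := by
  by_cases h0 : rt < 60
  · simp [customShapeLoopA, bisectRight, List.takeWhile, h0, show ¬(((60:Int)) ≤ rt) by omega]
  by_cases h1 : rt < 360
  · simp [customShapeLoopA, bisectRight, List.takeWhile, h0, h1, show ((60:Int)) ≤ rt by omega, show ¬(((360:Int)) ≤ rt) by omega]
  by_cases h2 : rt < 960
  · simp [customShapeLoopA, bisectRight, List.takeWhile, h0, h1, h2, show ((60:Int)) ≤ rt by omega, show ((360:Int)) ≤ rt by omega, show ¬(((960:Int)) ≤ rt) by omega]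
  by_cases h3 : rt < 2160
  · simp [customShapeLoopA, bisectRight, List.takeWhile, h0, h1, h2, h3, show ((60:Int)) ≤ rt by omega, show ((360:Int)) ≤ rt by omega, show ((960:Int)) ≤ rt by omega, show ¬(((2160:Int)) ≤ rt) by omega]
  by_cases h4 : rt < 2760
  · simp [customShapeLoopA, bisectRight, List.takeWhile, h0, h1, h2, h3, h4, show ((60:Int)) ≤ rt by omega, show ((360:Int)) ≤ rt by omega, show ((960:Int)) ≤ rt by omega, show ((2160:Int)) ≤ rt by omega, show ¬(((2760:Int)) ≤ rt) by omega]
  by_cases h5 : rt < 3060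
  · simp [customShapeLoopA, bisectRight, List.takeWhile, h0, h1, h2, h3, h4, h5, show ((60:Int)) ≤ rt by omega, show ((360:Int)) ≤ rt by omega, show ((960:Int)) ≤ rt by omega, show ((2160:Int)) ≤ rt by omega, show ((2760:Int)) ≤ rt by omega, show ¬(((3060:Int)) ≤ rt) by omega]
  by_cases h6 : rt < 3120
  · simp [customShapeLoopA, bisectRight, List.takeWhile, h0, h1, h2, h3, h4, h5, h6, show ((60:Int)) ≤ rt by omega, show ((360:Int)) ≤ rt by omega, show ((960:Int)) ≤ rt by omega, show ((2160:Int)) ≤ rt by omega, show ((2760:Int)) ≤ rt by omega, show ((3060:Int)) ≤ rt by omega, show ¬(((3120:Int)) ≤ rt) by omega]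
  · simp [customShapeLoopA, bisectRight, List.takeWhile, h0, h1, h2, h3, h4, h5, h6, show ((60:Int)) ≤ rt by omega, show ((360:Int)) ≤ rt by omega, show ((960:Int)) ≤ rt by omega, show ((2160:Int)) ≤ rt by omega, show ((2760:Int)) ≤ rt by omega, show ((3060:Int)) ≤ rt by omega, show ((3120:Int)) ≤ rt by omega]

-- ===== VERDICT (by name: the statement is the Claim_ definition above) =====
theorem custom_shape_spec : Claim_equal_custom_shape := by
  intro settings _ _
  unfold Spec_custom_shape custom_shape custom_shape_alt
  cases (PySem.Dict.mk settings).get? "run_time" with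
  | none => rfl
  | some rt => exact custom_shape_pointwise rt
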